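-- pv_equiv track=rewrite | github.com/huiyanglu/LearnCodewars | convertFracts.py | convertFracts
-- ===== SOURCE A (Python) =====
-- from functools import reduce
--
-- def gcd(a, b):
--     while b:
--         a, b = b, a % b
--     return a
--
-- def lcm(a, b):
--     return a * b // gcd(a, b)
--
-- def convertFracts(lst):
--     denoms = [i[1] for i in lst] # denominator分母
--     nums = [i[0] for i in lst] # numerator分子
--     lsttt = denoms + nums # [4, 6, 8, 2, 2, 2]
--     _gcd = reduce(gcd,lsttt) # 2
--     denoms2 = [i[1]//_gcd for i in lst] # 化简后的分母
--     nums2 = [i[0]//_gcd for i in lst] # 化简后的分子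
--     _lcm = reduce(lcm,denoms2) # lcm是函数
--     multi = [_lcm//i for i in denoms2]
--     return [[i*m,_lcm] for i,m in zip(nums2,multi)]
-- ===== SOURCE B (Python) =====
-- def convertFracts(lst):
--     def gcd2(a, b):
--         return a if b == 0 else gcd2(b, a % b)
--     # one fused accumulator pass over the rows: running gcd and running lcm
--     # of the denominators, no intermediate lists
--     gd = lam = lst[0][1]
--     for row in lst[1:]:
--         d = row[1]
--         gd, lam = gcd2(gd, d), lam * d // gcd2(lam, d)
--     # fold the numerators into the denominator gcd to get the global gcd
--     g = gd
--     for row in lst: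
--         g = gcd2(g, row[0])
--     # lcm(d_i/g) = lcm(d_i)//g and (n/g)*(L/(d/g)) = n*L//d by exact division
--     L = lam // g
--     return [[row[0] * L // row[1], L] for row in lst]
-- ===== Notes on version B (the rewrite author's own statement) =====
-- stated objective: simpler
-- what changed: B replaces A's staged pipeline (seven materialized lists: denoms, nums, concatenation, two reduced copies, multipliers, zip) by a single fused accumulator loop that maintains the running gcd and running lcm of the denominators together, a second fold of the numerators into that gcd, and direct row emission [n*L//d, L] from the original pairs using the exact-division identities lcm(d_i/g)=lcm(d_i)//g and (n/g)*(L/(d/g))=n*L//d; gcd is recursive instead of A's while loop.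
import Mathlib
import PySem

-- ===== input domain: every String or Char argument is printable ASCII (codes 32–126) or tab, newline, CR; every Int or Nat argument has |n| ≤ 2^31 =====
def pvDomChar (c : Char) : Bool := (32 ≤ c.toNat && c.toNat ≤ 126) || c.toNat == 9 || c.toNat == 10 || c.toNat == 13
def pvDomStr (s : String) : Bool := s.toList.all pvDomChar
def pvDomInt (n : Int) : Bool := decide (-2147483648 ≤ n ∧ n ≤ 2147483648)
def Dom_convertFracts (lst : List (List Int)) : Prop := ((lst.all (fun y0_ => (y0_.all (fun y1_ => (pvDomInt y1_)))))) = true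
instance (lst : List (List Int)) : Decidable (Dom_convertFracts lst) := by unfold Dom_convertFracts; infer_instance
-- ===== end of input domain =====

-- B replaces A's staged list pipeline (denoms/nums/concatenation/reduced copies/multipliers/zip)
-- by one fused accumulator loop over the rows (running gcd + running lcm of the denominators),
-- a numerator fold, and direct row emission [n*L//d, L] (objective: simpler).

-- termination fact for the Euclid recursion below (cited by its decreasing_by)
theorem pvMod_natAbs_lt (a b : Int) (hb : b ≠ 0) : (PySem.Int.mod a b).natAbs < b.natAbs := by
  rcases lt_or_gt_of_ne hb with h | h
  · have := PySem.Int.mod_neg_bounds (a := a) h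
    omega
  · have h1 := PySem.Int.mod_nonneg (a := a) h
    have h2 := PySem.Int.mod_lt (a := a) h
    omega

def pyGcd (a b : Int) : Int :=
  if hb : b = 0 then a else pyGcd b (PySem.Int.mod a b)
termination_by b.natAbs
decreasing_by exact pvMod_natAbs_lt a b hb

def pyLcm (a b : Int) : Int := PySem.Int.floordiv (a * b) (pyGcd a b)

def pyReduce (f : Int → Int → Int) : List Int → Int
  | [] => 0
  | x :: xs => xs.foldl f x

-- ===== PORT A =====
def convertFracts (lst : List (List Int)) : List (List Int) :=
  let denoms := lst.map (fun i => PySem.List.pyGetD i 1 0)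
  let nums := lst.map (fun i => PySem.List.pyGetD i 0 0)
  let lsttt := denoms ++ nums
  let g := pyReduce pyGcd lsttt
  let denoms2 := lst.map (fun i => PySem.Int.floordiv (PySem.List.pyGetD i 1 0) g)
  let nums2 := lst.map (fun i => PySem.Int.floordiv (PySem.List.pyGetD i 0 0) g)
  let l := pyReduce pyLcm denoms2
  let multi := denoms2.map (fun i => PySem.Int.floordiv l i)
  (nums2.zip multi).map (fun p => [p.1 * p.2, l])

-- ===== PORT B =====
-- B's fused loop: thread (gd, lam) across the remaining rows, inlined lam*d//gcd(lam,d)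
def pvScan (rows : List (List Int)) (gd lam : Int) : Int × Int :=
  rows.foldl (fun p row =>
    let d := PySem.List.pyGetD row 1 0
    (pyGcd p.1 d, PySem.Int.floordiv (p.2 * d) (pyGcd p.2 d))) (gd, lam)

def convertFracts_alt (lst : List (List Int)) : List (List Int) :=
  match lst with
  | [] => []   -- B raises IndexError on []; outside Pre_, value immaterial
  | row0 :: rest =>
    let d0 := PySem.List.pyGetD row0 1 0
    let p := pvScan rest d0 d0
    let g := (row0 :: rest).foldl (fun a row => pyGcd a (PySem.List.pyGetD row 0 0)) p.1
    let l := PySem.Int.floordiv p.2 g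
    (row0 :: rest).map (fun row =>
      [PySem.Int.floordiv (PySem.List.pyGetD row 0 0 * l) (PySem.List.pyGetD row 1 0), l])

-- ===== PRECONDITION & SPEC =====
-- A raises exactly on: empty lst (TypeError in reduce), an inner list shorter than 2 (IndexError),
-- or a zero denominator (ZeroDivisionError); Pre_ excludes exactly those inputs.
def Pre_convertFracts (lst : List (List Int)) : Prop :=
  lst ≠ [] ∧ ∀ i ∈ lst, 2 ≤ i.length ∧ PySem.List.pyGetD i 1 0 ≠ 0
instance (lst : List (List Int)) : Decidable (Pre_convertFracts lst) := by
  unfold Pre_convertFracts; infer_instance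

def pvWitness_convertFracts : List (List Int) := [[1, 2], [3, 4]]

def Spec_convertFracts (lst : List (List Int)) (out : List (List Int)) : Prop := out = convertFracts_alt lst
instance (lst : List (List Int)) (out : List (List Int)) : Decidable (Spec_convertFracts lst out) := by unfold Spec_convertFracts; infer_instance

-- ===== CLAIM (what is proved, stated in full; the proofs are below) =====
def Claim_equal_convertFracts : Prop := ∀ (lst : List (List Int)), Dom_convertFracts lst → Pre_convertFracts lst → Spec_convertFracts lst (convertFracts lst)

-- ===== LEMMAS AND PROOFS =====

theorem dvd_small (b m : Int) (h : b ∣ m) (h2 : m.natAbs < b.natAbs) : m = 0 := by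
  rcases h with ⟨k, rfl⟩
  rcases eq_or_ne k 0 with rfl | hk
  · ring
  · exfalso
    have : b.natAbs ≤ (b*k).natAbs := by
      rw [Int.natAbs_mul]
      exact Nat.le_mul_of_pos_right _ (by omega)
    omega

theorem pvFdivModUnique (a b q r : Int) (hb : b ≠ 0) (heq : a = q * b + r)
    (h1 : 0 < b → 0 ≤ r ∧ r < b) (h2 : b < 0 → b < r ∧ r ≤ 0) :
    PySem.Int.floordiv a b = q ∧ PySem.Int.mod a b = r := by
  have H := PySem.Int.floordiv_mul_add_mod a b
  set q' := PySem.Int.floordiv a b with hq'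
  set r' := PySem.Int.mod a b with hr'
  have hb1 : 0 < b → 0 ≤ r' ∧ r' < b := fun h => ⟨PySem.Int.mod_nonneg a h, PySem.Int.mod_lt a h⟩
  have hb2 : b < 0 → b < r' ∧ r' ≤ 0 := fun h => PySem.Int.mod_neg_bounds a h
  have hd : r - r' = b * (q' - q) := by linear_combination -heq - H
  have hz : r - r' = 0 := by
    refine dvd_small b _ ⟨q' - q, hd⟩ ?_
    rcases lt_or_gt_of_ne hb with h | h
    · have := h2 h; have := hb2 h; omega
    · have := h1 h; have := hb1 h; omega
  have hr : r' = r := by omega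
  refine ⟨?_, hr⟩
  have : b * (q' - q) = 0 := by omega
  rcases mul_eq_zero.mp this with h | h
  · exact absurd h hb
  · omega

theorem pvFdiv_mul_cancel (b k : Int) (hb : b ≠ 0) : PySem.Int.floordiv (b * k) b = k :=
  (pvFdivModUnique (b*k) b k 0 hb (by ring) (fun h => ⟨le_refl 0, h⟩) (fun h => ⟨h, le_refl 0⟩)).1

theorem pvFdiv_of_dvd (a b : Int) (hb : b ≠ 0) (h : b ∣ a) :
    b * PySem.Int.floordiv a b = a := by
  rcases h with ⟨k, rfl⟩
  rw [pvFdiv_mul_cancel b k hb]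

theorem pvMod_scale (a b c : Int) (hb : b ≠ 0) (hc : c ≠ 0) :
    PySem.Int.floordiv (c * a) (c * b) = PySem.Int.floordiv a b ∧
    PySem.Int.mod (c * a) (c * b) = c * PySem.Int.mod a b := by
  have H := PySem.Int.floordiv_mul_add_mod a b
  have hb1 : 0 < b → 0 ≤ PySem.Int.mod a b ∧ PySem.Int.mod a b < b :=
    fun h => ⟨PySem.Int.mod_nonneg a h, PySem.Int.mod_lt a h⟩
  have hb2 : b < 0 → b < PySem.Int.mod a b ∧ PySem.Int.mod a b ≤ 0 :=
    fun h => PySem.Int.mod_neg_bounds a h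
  apply pvFdivModUnique (c*a) (c*b) (PySem.Int.floordiv a b) (c * PySem.Int.mod a b)
    (mul_ne_zero hc hb) (by linear_combination -c * H)
  · intro h
    rcases mul_pos_iff.mp h with ⟨hc', hb'⟩ | ⟨hc', hb'⟩
    · have := hb1 hb'; constructor <;> nlinarith
    · have := hb2 hb'; constructor <;> nlinarith
  · intro h
    rcases mul_neg_iff.mp h with ⟨hc', hb'⟩ | ⟨hc', hb'⟩
    · have := hb2 hb'; constructor <;> nlinarith
    · have := hb1 hb'; constructor <;> nlinarith

theorem pvGcd_dvd (a b : Int) : pyGcd a b ∣ a ∧ pyGcd a b ∣ b := by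
  induction a, b using pyGcd.induct with
  | case1 a => rw [pyGcd]; simp
  | case2 a b hb ih =>
    rw [pyGcd, dif_neg hb]
    refine ⟨?_, ih.1⟩
    have H := PySem.Int.floordiv_mul_add_mod a b
    calc pyGcd b (PySem.Int.mod a b) ∣ PySem.Int.floordiv a b * b + PySem.Int.mod a b :=
          dvd_add (Dvd.dvd.mul_left ih.1 _) ih.2
      _ = a := H

theorem pvGcd_ne_zero (a b : Int) (h : a ≠ 0 ∨ b ≠ 0) : pyGcd a b ≠ 0 := by
  induction a, b using pyGcd.induct with
  | case1 a => rw [pyGcd, dif_pos rfl]; tauto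
  | case2 a b hb ih =>
    rw [pyGcd, dif_neg hb]
    exact ih (Or.inl hb)

theorem pvGcd_scale (a b c : Int) (hc : c ≠ 0) : pyGcd (c * a) (c * b) = c * pyGcd a b := by
  induction a, b using pyGcd.induct with
  | case1 a => simp [pyGcd]
  | case2 a b hb ih =>
    conv_lhs => rw [pyGcd]
    conv_rhs => rw [pyGcd]
    rw [dif_neg (mul_ne_zero hc hb), dif_neg hb, (pvMod_scale a b c hb hc).2, ih]

theorem pvLcm_ne_zero (a b : Int) (ha : a ≠ 0) (hb : b ≠ 0) : pyLcm a b ≠ 0 := by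
  have hg := pvGcd_ne_zero a b (Or.inl ha)
  have hd : pyGcd a b ∣ a * b := Dvd.dvd.mul_right (pvGcd_dvd a b).1 b
  have := pvFdiv_of_dvd (a*b) (pyGcd a b) hg hd
  intro h
  rw [pyLcm] at h
  rw [h, mul_zero] at this
  exact mul_ne_zero ha hb this.symm

theorem pvDvd_lcm (a b : Int) (ha : a ≠ 0) : a ∣ pyLcm a b ∧ b ∣ pyLcm a b := by
  rw [pyLcm]
  have hg : pyGcd a b ≠ 0 := pvGcd_ne_zero a b (Or.inl ha)
  obtain ⟨k, hk⟩ := (pvGcd_dvd a b).2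
  obtain ⟨m, hm⟩ := (pvGcd_dvd a b).1
  constructor
  · refine ⟨k, ?_⟩
    have h : a * b = pyGcd a b * (a * k) := by linear_combination a * hk
    rw [h, pvFdiv_mul_cancel _ _ hg]
  · refine ⟨m, ?_⟩
    have h : a * b = pyGcd a b * (b * m) := by linear_combination b * hm
    rw [h, pvFdiv_mul_cancel _ _ hg]

theorem pvLcm_scale (a b c : Int) (ha : a ≠ 0) (hc : c ≠ 0) :
    pyLcm (c * a) (c * b) = c * pyLcm a b := by
  rw [pyLcm, pyLcm, pvGcd_scale a b c hc]
  have hg : pyGcd a b ≠ 0 := pvGcd_ne_zero a b (Or.inl ha)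
  obtain ⟨k, hk⟩ := (pvGcd_dvd a b).2
  have h1 : c * a * (c * b) = (c * pyGcd a b) * (c * (a * k)) := by linear_combination (c * c * a) * hk
  have h2 : a * b = pyGcd a b * (a * k) := by linear_combination a * hk
  rw [h1, h2, pvFdiv_mul_cancel _ _ (mul_ne_zero hc hg), pvFdiv_mul_cancel _ _ hg]

theorem pvFoldGcd_dvd (l : List Int) (init : Int) :
    (l.foldl pyGcd init ∣ init) ∧ ∀ x ∈ l, l.foldl pyGcd init ∣ x := by
  induction l generalizing init with
  | nil => simp [dvd_refl]
  | cons x xs ih =>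
    simp only [List.foldl_cons]
    obtain ⟨h1, h2⟩ := ih (pyGcd init x)
    refine ⟨h1.trans (pvGcd_dvd init x).1, ?_⟩
    intro y hy
    rcases List.mem_cons.mp hy with rfl | hy
    · exact h1.trans (pvGcd_dvd init y).2
    · exact h2 y hy

theorem pvFoldGcd_ne_zero (l : List Int) (init : Int) (h : init ≠ 0) :
    l.foldl pyGcd init ≠ 0 := by
  induction l generalizing init with
  | nil => simpa using h
  | cons x xs ih =>
    simp only [List.foldl_cons]
    exact ih _ (pvGcd_ne_zero init x (Or.inl h))

theorem pvFoldLcm_dvd (l : List Int) (init : Int) (h : init ≠ 0) (hl : ∀ x ∈ l, x ≠ 0) :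
    (l.foldl pyLcm init ≠ 0) ∧ (init ∣ l.foldl pyLcm init) ∧ ∀ x ∈ l, x ∣ l.foldl pyLcm init := by
  induction l generalizing init with
  | nil =>
    simp only [List.foldl_nil]
    exact ⟨h, dvd_refl init, by simp⟩
  | cons x xs ih =>
    simp only [List.foldl_cons]
    have hx : x ≠ 0 := hl x (List.mem_cons_self ..)
    obtain ⟨h1, h2, h3⟩ := ih (pyLcm init x) (pvLcm_ne_zero init x h hx)
      (fun y hy => hl y (List.mem_cons_of_mem _ hy))
    refine ⟨h1, (pvDvd_lcm init x h).1.trans h2, ?_⟩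
    intro y hy
    rcases List.mem_cons.mp hy with rfl | hy
    · exact (pvDvd_lcm init y h).2.trans h2
    · exact h3 y hy

theorem pvFoldLcm_scale (l : List Int) (init c : Int) (h : init ≠ 0) (hc : c ≠ 0)
    (hl : ∀ x ∈ l, x ≠ 0) :
    (l.map (fun x => c * x)).foldl pyLcm (c * init) = c * l.foldl pyLcm init := by
  induction l generalizing init with
  | nil => rfl
  | cons x xs ih =>
    simp only [List.map_cons, List.foldl_cons]
    have hx : x ≠ 0 := hl x (List.mem_cons_self ..)
    rw [pvLcm_scale init x c h hc]
    exact ih _ (pvLcm_ne_zero init x h hx) (fun y hy => hl y (List.mem_cons_of_mem _ hy))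

-- B's fused pair-accumulator loop computes exactly the two independent folds
theorem pvScan_eq (rows : List (List Int)) (gd lam : Int) :
    pvScan rows gd lam
      = ((rows.map (fun i => PySem.List.pyGetD i 1 0)).foldl pyGcd gd,
         (rows.map (fun i => PySem.List.pyGetD i 1 0)).foldl pyLcm lam) := by
  induction rows generalizing gd lam with
  | nil => rfl
  | cons x xs ih =>
    simp only [pvScan, List.foldl_cons, List.map_cons] at *
    rw [ih]
    rfl

theorem pvRowEq (g Lr n d : Int) (hg : g ≠ 0) (hd : d ≠ 0)
    (hgd : g ∣ d) (hgn : g ∣ n) (hdvd : PySem.Int.floordiv d g ∣ Lr) :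
    PySem.Int.floordiv n g * PySem.Int.floordiv Lr (PySem.Int.floordiv d g)
      = PySem.Int.floordiv (n * Lr) d := by
  obtain ⟨k, hk⟩ := hdvd
  have hdd := pvFdiv_of_dvd d g hg hgd
  have hn := pvFdiv_of_dvd n g hg hgn
  have hd' : PySem.Int.floordiv d g ≠ 0 := by
    intro h0; apply hd; rw [← hdd, h0, mul_zero]
  rw [hk, pvFdiv_mul_cancel _ _ hd']
  have key : n * (PySem.Int.floordiv d g * k) = d * (PySem.Int.floordiv n g * k) := by
    linear_combination (PySem.Int.floordiv n g * k) * hdd - (PySem.Int.floordiv d g * k) * hn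
  rw [key, pvFdiv_mul_cancel _ _ hd]

theorem pvMain (i0 : List Int) (rest : List (List Int))
    (hall : ∀ i ∈ i0 :: rest, 2 ≤ i.length ∧ PySem.List.pyGetD i 1 0 ≠ 0) :
    convertFracts (i0 :: rest) = convertFracts_alt (i0 :: rest) := by
  simp only [convertFracts, convertFracts_alt, pvScan_eq]
  -- the two gcd computations are the same fold over denoms then nums
  have hgAB : pyReduce pyGcd ((i0 :: rest).map (fun i => PySem.List.pyGetD i 1 0)
        ++ (i0 :: rest).map (fun i => PySem.List.pyGetD i 0 0))
      = (rest.map (fun i => PySem.List.pyGetD i 1 0)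
          ++ (i0 :: rest).map (fun i => PySem.List.pyGetD i 0 0)).foldl pyGcd
          (PySem.List.pyGetD i0 1 0) := by
    simp only [List.map_cons, List.cons_append, pyReduce]
  have hgB : (i0 :: rest).foldl (fun a row => pyGcd a (PySem.List.pyGetD row 0 0))
        ((rest.map (fun i => PySem.List.pyGetD i 1 0)).foldl pyGcd (PySem.List.pyGetD i0 1 0))
      = (rest.map (fun i => PySem.List.pyGetD i 1 0)
          ++ (i0 :: rest).map (fun i => PySem.List.pyGetD i 0 0)).foldl pyGcd
          (PySem.List.pyGetD i0 1 0) := by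
    rw [List.foldl_append, ← List.foldl_map]
  rw [hgAB, hgB]
  set g := (rest.map (fun i => PySem.List.pyGetD i 1 0)
      ++ (i0 :: rest).map (fun i => PySem.List.pyGetD i 0 0)).foldl pyGcd
      (PySem.List.pyGetD i0 1 0) with hgdef
  have hg0 : g ≠ 0 := pvFoldGcd_ne_zero _ _ (hall i0 (List.mem_cons_self ..)).2
  have hfold := pvFoldGcd_dvd (rest.map (fun i => PySem.List.pyGetD i 1 0)
      ++ (i0 :: rest).map (fun i => PySem.List.pyGetD i 0 0)) (PySem.List.pyGetD i0 1 0)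
  have hgd : ∀ i ∈ i0 :: rest, g ∣ PySem.List.pyGetD i 1 0 := by
    intro i hi
    rcases List.mem_cons.mp hi with rfl | hi
    · exact hfold.1
    · exact hfold.2 _ (List.mem_append_left _ (List.mem_map_of_mem hi))
  have hgn : ∀ i ∈ i0 :: rest, g ∣ PySem.List.pyGetD i 0 0 :=
    fun i hi => hfold.2 _ (List.mem_append_right _ (List.mem_map_of_mem hi))
  -- reduced denominators are nonzero
  have hd0 : ∀ i ∈ i0 :: rest, PySem.Int.floordiv (PySem.List.pyGetD i 1 0) g ≠ 0 := by
    intro i hi h0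
    apply (hall i hi).2
    rw [← pvFdiv_of_dvd _ g hg0 (hgd i hi), h0, mul_zero]
  -- lcm of original denominators = g * lcm of reduced denominators
  set Lr := (rest.map (fun i => PySem.Int.floordiv (PySem.List.pyGetD i 1 0) g)).foldl pyLcm
      (PySem.Int.floordiv (PySem.List.pyGetD i0 1 0) g) with hLrdef
  have hmapd : rest.map (fun i => PySem.List.pyGetD i 1 0)
      = (rest.map (fun i => PySem.Int.floordiv (PySem.List.pyGetD i 1 0) g)).map (fun x => g * x) := by
    rw [List.map_map]
    apply List.map_congr_left
    intro i hi
    exact (pvFdiv_of_dvd _ g hg0 (hgd i (List.mem_cons_of_mem _ hi))).symm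
  have hLB : (rest.map (fun i => PySem.List.pyGetD i 1 0)).foldl pyLcm (PySem.List.pyGetD i0 1 0)
      = g * Lr := by
    rw [hmapd, show PySem.List.pyGetD i0 1 0
        = g * PySem.Int.floordiv (PySem.List.pyGetD i0 1 0) g from
        (pvFdiv_of_dvd _ g hg0 (hgd i0 (List.mem_cons_self ..))).symm]
    exact pvFoldLcm_scale _ _ g (hd0 i0 (List.mem_cons_self ..)) hg0
      (fun x hx => by
        obtain ⟨i, hi, rfl⟩ := List.mem_map.mp hx
        exact hd0 i (List.mem_cons_of_mem _ hi))
  have hA2 : pyReduce pyLcm ((i0 :: rest).map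
      (fun i => PySem.Int.floordiv (PySem.List.pyGetD i 1 0) g)) = Lr := by
    simp only [List.map_cons, pyReduce]
    exact hLrdef.symm
  have hB2 : PySem.Int.floordiv
      ((rest.map (fun i => PySem.List.pyGetD i 1 0)).foldl pyLcm (PySem.List.pyGetD i0 1 0)) g
      = Lr := by
    rw [hLB, pvFdiv_mul_cancel _ _ hg0]
  rw [hA2, hB2]
  -- divisibility of the reduced denominators into Lr
  have hLr := pvFoldLcm_dvd (rest.map (fun i => PySem.Int.floordiv (PySem.List.pyGetD i 1 0) g))
      (PySem.Int.floordiv (PySem.List.pyGetD i0 1 0) g) (hd0 i0 (List.mem_cons_self ..))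
      (fun x hx => by
        obtain ⟨i, hi, rfl⟩ := List.mem_map.mp hx
        exact hd0 i (List.mem_cons_of_mem _ hi))
  have hdLr : ∀ i ∈ i0 :: rest, PySem.Int.floordiv (PySem.List.pyGetD i 1 0) g ∣ Lr := by
    intro i hi
    rcases List.mem_cons.mp hi with rfl | hi
    · exact hLr.2.1
    · exact hLr.2.2 _ (List.mem_map_of_mem hi)
  -- rows
  rw [List.map_map, List.zip_map', List.map_map]
  apply List.map_congr_left
  intro i hi
  simp only [Function.comp_apply]
  rw [pvRowEq g Lr (PySem.List.pyGetD i 0 0) (PySem.List.pyGetD i 1 0) hg0 (hall i hi).2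
    (hgd i hi) (hgn i hi) (hdLr i hi)]

-- ===== VERDICT (by name: the statement is the Claim_ definition above) =====
theorem convertFracts_spec : Claim_equal_convertFracts := by
  intro lst _dom pre
  obtain ⟨hne, hall⟩ := pre
  obtain ⟨i0, rest, rfl⟩ := List.exists_cons_of_ne_nil hne
  unfold Spec_convertFracts
  exact pvMain i0 rest hall
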